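-- pv_equiv track=rewrite | github.com/krystianbajno/encode-tools | rop_tool.py | shellcode_to_c_array
-- ===== SOURCE A (Python) =====
-- def shellcode_to_c_array(shellcode):
--     """Convert shellcode to C array format"""
--     clean_shellcode = shellcode.replace(' ', '').replace('\\x', '')
--     c_array = 'unsigned char shellcode[] = \n"'
--
--     for i in range(0, len(clean_shellcode), 2):
--         if i > 0 and i % 32 == 0:
--             c_array += '"\n"'
--         if i + 1 < len(clean_shellcode):
--             c_array += f"\\x{clean_shellcode[i:i+2]}"
--
--     c_array += '";\n'
--     c_array += f'int shellcode_len = {len(clean_shellcode) // 2};'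
--     return c_array
-- ===== SOURCE B (Python) =====
-- def shellcode_to_c_array(shellcode):
--     """Convert shellcode to C array format"""
--     clean = shellcode.replace(' ', '').replace('\\x', '')
--     chunks = [clean[j:j+32] for j in range(0, len(clean), 32)]
--     body = '"\n"'.join(
--         ''.join('\\x' + ch[k:k+2] for k in range(0, len(ch) - 1, 2))
--         for ch in chunks)
--     return ('unsigned char shellcode[] = \n"' + body + '";\n'
--             + f'int shellcode_len = {len(clean) // 2};')
-- ===== Notes on version B (the rewrite author's own statement) =====
-- stated objective: simpler
-- what changed: Replaces the index-stepping accumulator loop with trailing-separator bookkeeping by a declarative pipeline: chunk the cleaned hex into 32-char lines, render each line by joining complete byte pairs, and join the lines with the quote-newline separator.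
import Mathlib
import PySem

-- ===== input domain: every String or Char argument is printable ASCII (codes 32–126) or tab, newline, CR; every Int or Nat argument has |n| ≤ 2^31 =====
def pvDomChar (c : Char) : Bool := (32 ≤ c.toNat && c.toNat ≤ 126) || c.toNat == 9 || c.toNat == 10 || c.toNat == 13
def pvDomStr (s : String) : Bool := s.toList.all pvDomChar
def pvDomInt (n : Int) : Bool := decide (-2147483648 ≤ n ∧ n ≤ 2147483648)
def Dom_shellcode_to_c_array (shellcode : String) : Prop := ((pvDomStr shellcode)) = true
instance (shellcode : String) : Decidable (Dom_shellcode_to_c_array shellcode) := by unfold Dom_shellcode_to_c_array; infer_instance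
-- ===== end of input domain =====

-- B replaces A's index-stepping accumulator loop (separator emitted mid-loop) by a
-- chunk-then-join pipeline over 32-char lines and 2-char byte pairs; same output, simpler shape.


-- ===== PORT A =====
-- the body of A's for-loop: two sequential ifs updating the accumulator string
def fA (cs : List Char) (acc : List Char) (i : Int) : List Char :=
  let acc1 := if 0 < i ∧ PySem.Int.mod i 32 = 0 then acc ++ ['"', '\n', '"'] else acc
  if i + 1 < (cs.length : Int) then
    acc1 ++ '\\' :: 'x' :: PySem.List.slice cs (some i) (some (i + 2))
  else acc1

def shellcode_to_c_array (shellcode : String) : String :=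
  let clean := PySem.Str.replace (PySem.Str.replace shellcode " " "") "\\x" ""
  let cs := clean.toList
  let acc := (PySem.List.pyRange 0 (cs.length : Int) 2).foldl (fA cs)
      "unsigned char shellcode[] = \n\"".toList
  String.ofList (acc ++ "\";\n".toList ++ "int shellcode_len = ".toList
    ++ PySem.Int.toChars (PySem.Int.floordiv (cs.length : Int) 2) ++ ";".toList)

-- ===== PORT B =====
-- body of one 32-char line: '\x'+pair over the complete 2-char slices of the chunk
def lineChunk (ch : List Char) : List Char :=
  PySem.Chars.join [] ((PySem.List.pyRange 0 ((ch.length : Int) - 1) 2).map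
    (fun k => '\\' :: 'x' :: PySem.List.slice ch (some k) (some (k + 2))))

def shellcode_to_c_array_alt (shellcode : String) : String :=
  let clean := PySem.Str.replace (PySem.Str.replace shellcode " " "") "\\x" ""
  let cs := clean.toList
  let chunks := (PySem.List.pyRange 0 (cs.length : Int) 32).map
      (fun j => PySem.List.slice cs (some j) (some (j + 32)))
  let body := PySem.Chars.join "\"\n\"".toList (chunks.map lineChunk)
  String.ofList ("unsigned char shellcode[] = \n\"".toList ++ body ++ "\";\n".toList
    ++ "int shellcode_len = ".toList
    ++ PySem.Int.toChars (PySem.Int.floordiv (cs.length : Int) 2) ++ ";".toList)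

-- ===== PRECONDITION & SPEC =====
def Spec_shellcode_to_c_array (shellcode : String) (out : String) : Prop := out = shellcode_to_c_array_alt shellcode
instance (shellcode : String) (out : String) : Decidable (Spec_shellcode_to_c_array shellcode out) := by unfold Spec_shellcode_to_c_array; infer_instance

-- ===== CLAIM (what is proved, stated in full; the proofs are below) =====
def Claim_equal_shellcode_to_c_array : Prop := ∀ (shellcode : String), Dom_shellcode_to_c_array shellcode → Spec_shellcode_to_c_array shellcode (shellcode_to_c_array shellcode)

-- ===== LEMMAS AND PROOFS =====

-- proof-side recursive characterisations of the two bodies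
def lineBody : List Char → List Char
  | [] => []
  | [_] => []
  | a :: b :: t => '\\' :: 'x' :: a :: b :: lineBody t

-- A's loop, as a recursion on the remaining characters with the absolute index i
def g : List Char → Nat → List Char
  | [], _ => []
  | [_], i => if 0 < i ∧ i % 32 = 0 then ['"', '\n', '"'] else []
  | a :: b :: t, i =>
      (if 0 < i ∧ i % 32 = 0 then ['"', '\n', '"'] else []) ++
      '\\' :: 'x' :: a :: b :: g t (i + 2)

def chunksR (cs : List Char) : List (List Char) :=
  if _h : cs = [] then [] else cs.take 32 :: chunksR (cs.drop 32)
termination_by cs.length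
decreasing_by
  simp only [List.length_drop]
  have : 0 < cs.length := List.length_pos_iff.mpr _h
  omega

theorem pyRange_cons_of_pos (a b s : Int) (hs : 0 < s) (h : a < b) :
    PySem.List.pyRange a b s = a :: PySem.List.pyRange (a + s) b s := by
  rw [PySem.List.pyRange_of_pos _ _ hs, PySem.List.pyRange_of_pos _ _ hs]
  have hc : b - a + s - 1 = (b - a - 1) + 1 * s := by ring
  have hdiv : (b - a + s - 1) / s = (b - a - 1) / s + 1 := by
    rw [hc, Int.add_mul_ediv_right _ _ (by omega)]
  have hnn : 0 ≤ (b - a - 1) / s := Int.ediv_nonneg (by omega) (by omega)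
  have hcount : ((b - a + s - 1) / s).toNat = ((b - a - 1) / s).toNat + 1 := by omega
  have hcount2 : (if a + s < b then ((b - (a + s) + s - 1) / s).toNat else 0)
      = ((b - a - 1) / s).toNat := by
    by_cases h2 : a + s < b
    · simp only [h2, if_true]
      congr 1
      congr 1
      ring_nf
    · simp only [h2, if_false]
      have : (b - a - 1) / s = 0 := Int.ediv_eq_zero_of_lt (by omega) (by omega)
      omega
  rw [if_pos h, hcount, hcount2, List.range_succ_eq_map, List.map_cons, List.map_map]
  refine List.cons_eq_cons.mpr ⟨by simp, ?_⟩
  apply List.map_congr_left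
  intro k _
  simp only [Function.comp_apply]
  push_cast
  ring

theorem pyRange_nil_of_pos (a b s : Int) (hs : 0 < s) (h : b ≤ a) :
    PySem.List.pyRange a b s = [] := by
  rw [PySem.List.pyRange_of_pos _ _ hs, if_neg (by omega)]
  simp

theorem join_empty_sep (ps : List (List Char)) : PySem.Chars.join [] ps = ps.flatten := by
  induction ps with
  | nil => simp [PySem.Chars.join_nil]
  | cons p rest ih =>
      cases rest with
      | nil => simp [PySem.Chars.join_singleton]
      | cons q r =>
          rw [PySem.Chars.join_cons_cons]
          simp only [List.flatten_cons] at *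
          rw [ih]
          simp

theorem chunksR_cons (cs : List Char) (h : cs ≠ []) :
    chunksR cs = cs.take 32 :: chunksR (cs.drop 32) := by
  rw [chunksR]; simp [h]

theorem condA (k : Nat) :
    (0 < 2 * (k : Int) ∧ PySem.Int.mod (2 * (k : Int)) 32 = 0) ↔ (0 < 2 * k ∧ (2 * k) % 32 = 0) := by
  rw [show (2 * (k : Int)) = ((2 * k : Nat) : Int) by push_cast; ring,
    show (32 : Int) = ((32 : Nat) : Int) by norm_num, PySem.Int.mod_natCast]
  constructor <;> rintro ⟨h1, h2⟩ <;> exact ⟨by exact_mod_cast h1, by exact_mod_cast h2⟩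

theorem sliceA (cs : List Char) (k : Nat) :
    PySem.List.slice cs (some (2 * (k : Int))) (some (2 * (k : Int) + 2))
      = (cs.drop (2 * k)).take 2 := by
  rw [show (2 * (k : Int)) = ((2 * k : Nat) : Int) by push_cast; ring,
    show ((2 * k : Nat) : Int) + 2 = ((2 * k : Nat) : Int) + ((2 : Nat) : Int) by norm_num,
    PySem.List.slice_natCast_add]

theorem foldA (cs : List Char) (k : Nat) (acc : List Char) :
    (PySem.List.pyRange (2 * (k : Int)) (cs.length : Int) 2).foldl (fA cs) acc
      = acc ++ g (cs.drop (2 * k)) (2 * k) := by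
  by_cases h : 2 * k < cs.length
  · rw [pyRange_cons_of_pos _ _ 2 (by norm_num) (by exact_mod_cast h), List.foldl_cons,
      show (2 * (k : Int)) + 2 = 2 * ((k + 1 : Nat) : Int) by push_cast; ring,
      foldA cs (k + 1)]
    have hdd : cs.drop (2 * (k + 1)) = (cs.drop (2 * k)).drop 2 := by
      rw [List.drop_drop]; congr 1
    rcases hrem : cs.drop (2 * k) with _ | ⟨a, t1⟩
    · exfalso
      have := List.drop_eq_nil_iff.mp hrem; omega
    · have hlen : (cs.drop (2 * k)).length = cs.length - 2 * k := List.length_drop ..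
      rcases t1 with _ | ⟨b, t⟩
      · have h1 : cs.length = 2 * k + 1 := by rw [hrem] at hlen; simp at hlen; omega
        rw [hdd, hrem]
        simp only [fA, List.drop_succ_cons, List.drop_nil, g]
        rw [if_neg (by rw [h1]; push_cast; all_goals omega)]
        rw [if_congr (condA k) rfl rfl]
        split_ifs with hc
        · simp
        · simp
      · have h2 : 2 * k + 2 ≤ cs.length := by rw [hrem] at hlen; simp at hlen; omega
        rw [hdd, hrem]
        simp only [fA, List.drop_succ_cons, g]
        rw [if_pos (by exact_mod_cast (by omega : ((2*k+1:Nat):Int) < (cs.length:Int))), sliceA, hrem]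
        rw [if_congr (condA k) rfl rfl, show 2 * (k + 1) = 2 * k + 2 from by ring]
        split_ifs with hc
        · simp
        · simp
  · rw [pyRange_nil_of_pos _ _ 2 (by norm_num) (by exact_mod_cast Nat.not_lt.mp h),
      List.foldl_nil, List.drop_eq_nil_iff.mpr (by omega)]
    simp [g]
termination_by cs.length - 2 * k
decreasing_by omega

theorem chunksLemma (cs : List Char) (k : Nat) :
    (PySem.List.pyRange (32 * (k : Int)) (cs.length : Int) 32).map
        (fun j => PySem.List.slice cs (some j) (some (j + 32)))
      = chunksR (cs.drop (32 * k)) := by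
  by_cases h : 32 * k < cs.length
  · have hne : cs.drop (32 * k) ≠ [] := by
      intro hh; have := List.drop_eq_nil_iff.mp hh; omega
    have hdd : cs.drop (32 * (k + 1)) = (cs.drop (32 * k)).drop 32 := by
      rw [List.drop_drop]; congr 1
    have hslice : PySem.List.slice cs (some (32 * (k : Int))) (some (32 * (k : Int) + 32))
        = (cs.drop (32 * k)).take 32 := by
      rw [show (32 * (k : Int)) = ((32 * k : Nat) : Int) by push_cast; ring,
        show ((32 * k : Nat) : Int) + 32 = ((32 * k : Nat) : Int) + ((32 : Nat) : Int) by norm_num,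
        PySem.List.slice_natCast_add]
    rw [pyRange_cons_of_pos _ _ 32 (by norm_num) (by exact_mod_cast h)]
    simp only [List.map_cons]
    rw [hslice,
      show (32 * (k : Int)) + 32 = 32 * ((k + 1 : Nat) : Int) by push_cast; ring,
      chunksLemma cs (k + 1), hdd, chunksR_cons _ hne]
  · rw [pyRange_nil_of_pos _ _ 32 (by norm_num) (by exact_mod_cast Nat.not_lt.mp h),
      List.map_nil, List.drop_eq_nil_iff.mpr (by omega), chunksR, dif_pos rfl]
termination_by cs.length - 32 * k
decreasing_by omega

theorem innerLemma (ch : List Char) (k : Nat) :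
    ((PySem.List.pyRange (2 * (k : Int)) ((ch.length : Int) - 1) 2).map
        (fun i => '\\' :: 'x' :: PySem.List.slice ch (some i) (some (i + 2)))).flatten
      = lineBody (ch.drop (2 * k)) := by
  by_cases h : 2 * k + 2 ≤ ch.length
  · rw [pyRange_cons_of_pos _ _ 2 (by norm_num) (by omega), List.map_cons,
      List.flatten_cons, sliceA,
      show (2 * (k : Int)) + 2 = 2 * ((k + 1 : Nat) : Int) by push_cast; ring,
      innerLemma ch (k + 1)]
    have hdd : ch.drop (2 * (k + 1)) = (ch.drop (2 * k)).drop 2 := by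
      rw [List.drop_drop]; congr 1
    rw [hdd]
    have hlen : (ch.drop (2 * k)).length = ch.length - 2 * k := List.length_drop ..
    rcases hrem : ch.drop (2 * k) with _ | ⟨a, _ | ⟨b, t⟩⟩
    · exfalso; rw [hrem] at hlen; simp at hlen; omega
    · exfalso; rw [hrem] at hlen; simp at hlen; omega
    · simp [lineBody]
  · rw [pyRange_nil_of_pos _ _ 2 (by norm_num) (by omega), List.map_nil,
      List.flatten_nil]
    have hlen : (ch.drop (2 * k)).length = ch.length - 2 * k := List.length_drop ..
    rcases hrem : ch.drop (2 * k) with _ | ⟨a, _ | ⟨b, t⟩⟩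
    · simp [lineBody]
    · simp [lineBody]
    · exfalso; rw [hrem] at hlen; simp at hlen; omega
termination_by ch.length - 2 * k
decreasing_by omega

theorem lineChunk_eq (ch : List Char) : lineChunk ch = lineBody ch := by
  have := innerLemma ch 0
  simpa [lineChunk, join_empty_sep] using this

theorem g_small (cs : List Char) (i : Nat) (hi : 0 < i) (hle : i + cs.length ≤ 32) :
    g cs i = lineBody cs := by
  match cs with
  | [] => simp [g, lineBody]
  | [a] =>
      simp only [List.length_cons, List.length_nil] at hle
      simp [g, lineBody, Nat.mod_eq_of_lt (show i < 32 by omega)]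
      omega
  | a :: b :: t =>
      simp only [List.length_cons] at hle
      rw [g, lineBody, g_small t (i + 2) (by omega) (by omega)]
      rw [if_neg]
      · simp
      · rw [Nat.mod_eq_of_lt (show i < 32 by omega)]
        omega

theorem g_small0 (cs : List Char) (hle : cs.length ≤ 32) : g cs 0 = lineBody cs := by
  match cs with
  | [] => simp [g, lineBody]
  | [a] => simp [g, lineBody]
  | a :: b :: t =>
      simp only [List.length_cons] at hle
      rw [g, lineBody, g_small t 2 (by omega) (by omega)]
      simp

theorem cond_shift (i : Nat) (hi : 2 ≤ i) :
    (0 < i + 32 ∧ (i + 32) % 32 = 0) ↔ (0 < i ∧ i % 32 = 0) := by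
  rw [Nat.add_mod_right]
  constructor <;> rintro ⟨h1, h2⟩ <;> exact ⟨by omega, h2⟩

theorem g_shift (t : List Char) (i : Nat) (hi : 2 ≤ i) : g t (i + 32) = g t i := by
  match t with
  | [] => simp [g]
  | [a] =>
      simp only [g]
      rw [if_congr (cond_shift i hi) rfl rfl]
  | a :: b :: t' =>
      simp only [g]
      rw [show i + 32 + 2 = (i + 2) + 32 by omega, g_shift t' (i + 2) (by omega)]
      rw [if_congr (cond_shift i hi) rfl rfl]

theorem g_32 (rem : List Char) (h : rem ≠ []) :
    g rem 32 = ['"', '\n', '"'] ++ g rem 0 := by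
  match rem with
  | [a] => simp [g]
  | a :: b :: t =>
      simp only [g]
      rw [show (32 : Nat) + 2 = 2 + 32 by omega, g_shift t 2 (by omega)]
      simp

theorem g_mid (cs : List Char) (i : Nat) (h2 : i % 2 = 0) (hi : 0 < i) (hlt : i < 32)
    (hlen : 32 - i < cs.length) :
    g cs i = lineBody (cs.take (32 - i)) ++ ['"', '\n', '"'] ++ g (cs.drop (32 - i)) 0 := by
  match cs with
  | [] => simp at hlen
  | [a] => simp at hlen; omega
  | a :: b :: t =>
      simp only [List.length_cons] at hlen
      have hsep : ¬ (0 < i ∧ i % 32 = 0) := by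
        rw [Nat.mod_eq_of_lt hlt]; omega
      by_cases h30 : i = 30
      · subst h30
        have ht : t ≠ [] := by intro h; subst h; simp at hlen
        rw [g, if_neg hsep, g_32 t ht]
        simp [lineBody]
      · have hi2 : i + 2 < 32 := by omega
        rw [g, if_neg hsep, g_mid t (i + 2) (by omega) (by omega) hi2 (by omega)]
        have hta : 32 - i = (30 - i) + 1 + 1 := by omega
        rw [hta, List.take_succ_cons, List.take_succ_cons, List.drop_succ_cons,
          List.drop_succ_cons, lineBody]
        have : 30 - i = 32 - (i + 2) := by omega
        rw [this]
        simp
termination_by 32 - i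

theorem g_chunk (cs : List Char) (h : 32 < cs.length) :
    g cs 0 = lineBody (cs.take 32) ++ ['"', '\n', '"'] ++ g (cs.drop 32) 0 := by
  match cs with
  | a :: b :: t =>
      simp only [List.length_cons] at h
      rw [g, if_neg (by omega), g_mid t 2 (by omega) (by omega) (by omega) (by omega)]
      rw [show (32 : Nat) = 30 + 1 + 1 by omega, List.take_succ_cons, List.take_succ_cons,
        List.drop_succ_cons, List.drop_succ_cons, lineBody]
      simp
  | [] => simp at h
  | [a] => simp at h

theorem g_join (cs : List Char) :
    g cs 0 = PySem.Chars.join ['"', '\n', '"'] ((chunksR cs).map lineBody) := by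
  by_cases h0 : cs = []
  · subst h0; simp [g, chunksR, PySem.Chars.join_nil]
  by_cases h32 : cs.length ≤ 32
  · rw [chunksR_cons cs h0]
    have hd : cs.drop 32 = [] := by
      rw [List.drop_eq_nil_iff]; omega
    have ht : cs.take 32 = cs := List.take_of_length_le (by omega)
    rw [hd, chunksR, dif_pos rfl, ht, List.map_cons, List.map_nil,
      PySem.Chars.join_singleton, g_small0 cs (by omega)]
  · rw [Nat.not_le] at h32
    have hdne : cs.drop 32 ≠ [] := by
      intro h; rw [List.drop_eq_nil_iff] at h; omega
    rw [chunksR_cons cs h0, List.map_cons, chunksR_cons _ hdne, List.map_cons,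
      PySem.Chars.join_cons_cons, g_chunk cs h32, g_join (cs.drop 32),
      chunksR_cons _ hdne, List.map_cons]
termination_by cs.length
decreasing_by simp; omega

-- ===== VERDICT (by name: the statement is the Claim_ definition above) =====
set_option maxHeartbeats 1000000 in
theorem shellcode_to_c_array_spec : Claim_equal_shellcode_to_c_array := by
  intro s _
  unfold Spec_shellcode_to_c_array
  dsimp only [shellcode_to_c_array, shellcode_to_c_array_alt]
  have hA := foldA ((PySem.Str.replace (PySem.Str.replace s " " "") "\\x" "").toList) 0
      ("unsigned char shellcode[] = \n\"".toList)
  have hC := chunksLemma ((PySem.Str.replace (PySem.Str.replace s " " "") "\\x" "").toList) 0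
  simp only [Nat.cast_zero, mul_zero, List.drop_zero] at hA hC
  rw [hA, g_join, hC, show lineChunk = lineBody from funext lineChunk_eq]
  rw [show ("\"\n\"".toList) = ['\"', '\n', '\"'] from rfl]
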